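-- pv_equiv track=rewrite | github.com/Monrillo/AoC | 2025/day3.py | part2
-- ===== SOURCE A (Python) =====
-- def part2(line):
--     res=''
--     pos=len(line)-12
--     for c in range(len(line)):
--         if len(res)==12:break
--         if c>=pos:
--             res+=line[c]
--         elif c<pos:
--             m=max(line[c:pos])
--             if line[c]==m and m>=line[pos]:
--                 res+=line[c]
--                 if pos<len(line)-1:pos+=1
--     return res
-- ===== SOURCE B (Python) =====
-- def part2(line):
--     # Greedy "lexicographically largest 12-char subsequence": for each of the 12
--     # output slots take the leftmost maximum of the still-allowed window.  O(n)
--     # instead of A's per-position max(line[c:pos]) rescan (O(n^2)).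
--     n = len(line)
--     if n <= 12:
--         return line
--     out = []
--     start = 0
--     for i in range(12):
--         end = n - 12 + i          # last index this pick may use
--         j = start
--         for t in range(start + 1, end + 1):
--             if line[t] > line[j]:
--                 j = t
--         out.append(line[j])
--         start = j + 1
--     return ''.join(out)
-- ===== Notes on version B (the rewrite author's own statement) =====
-- stated objective: faster
-- what changed: A rescans max(line[c:pos]) at every position (O(n^2)); B makes twelve direct leftmost-argmax picks over the shrinking allowed windows, one O(n) scan per output character.
import Mathlib
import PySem

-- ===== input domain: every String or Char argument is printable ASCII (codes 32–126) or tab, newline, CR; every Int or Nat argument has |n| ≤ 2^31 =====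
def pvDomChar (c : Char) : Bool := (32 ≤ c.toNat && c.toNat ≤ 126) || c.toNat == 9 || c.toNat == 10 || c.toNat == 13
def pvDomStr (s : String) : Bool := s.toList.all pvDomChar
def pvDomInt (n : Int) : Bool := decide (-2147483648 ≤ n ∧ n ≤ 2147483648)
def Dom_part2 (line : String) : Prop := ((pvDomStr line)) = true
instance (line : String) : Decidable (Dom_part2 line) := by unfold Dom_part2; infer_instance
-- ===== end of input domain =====

-- B replaces A's per-position max(line[c:pos]) rescan by twelve leftmost-argmax picks (objective: faster).

-- ===== PORT A =====
-- the for-loop over range(len(line)) with state (res, pos); `break` = return res.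
-- max(line[c:pos]) is never empty when evaluated (0 ≤ c < pos), so `.getD ' '` is unreachable padding.
def part2Loop (cs : List Char) (n : Int) : List Int → List Char → Int → List Char
  | [], res, _ => res
  | c :: rest, res, pos =>
    if res.length = 12 then res
    else if pos ≤ c then part2Loop cs n rest (res ++ [PySem.List.pyGetD cs c ' ']) pos
    else
      let m := (PySem.List.max? (PySem.List.slice cs (some c) (some pos)) (fun y => y)).getD ' '
      if PySem.List.pyGetD cs c ' ' = m ∧ PySem.List.pyGetD cs pos ' ' ≤ m then
        part2Loop cs n rest (res ++ [PySem.List.pyGetD cs c ' '])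
          (if pos < n - 1 then pos + 1 else pos)
      else part2Loop cs n rest res pos

def part2 (line : String) : String :=
  let cs := line.toList
  String.ofList
    (part2Loop cs (cs.length : Int) (PySem.List.pyRange 0 (cs.length : Int) 1) []
      ((cs.length : Int) - 12))

-- ===== PORT B =====
-- inner scan: j = leftmost argmax of line[...] over the indices in ts (B's `for t in range(start+1, end+1)`)
def altScan (cs : List Char) : List Nat → Nat → Nat
  | [], j => j
  | t :: rest, j => altScan cs rest (if cs.getD j ' ' < cs.getD t ' ' then t else j)

-- B's `for i in range(12)` with state (start, out)
def altPicks (cs : List Char) (n : Nat) : List Nat → Nat → List Char → List Char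
  | [], _, out => out
  | i :: rest, start, out =>
    let e := n - 12 + i
    let j := altScan cs (List.range' (start + 1) (e - start)) start
    altPicks cs n rest (j + 1) (out ++ [cs.getD j ' '])

def part2_alt (line : String) : String :=
  let cs := line.toList
  if cs.length ≤ 12 then line
  else String.ofList (altPicks cs cs.length (List.range 12) 0 [])

-- ===== PRECONDITION & SPEC =====
def Spec_part2 (line : String) (out : String) : Prop := out = part2_alt line
instance (line : String) (out : String) : Decidable (Spec_part2 line out) := by unfold Spec_part2; infer_instance

-- ===== CLAIM (what is proved, stated in full; the proofs are below) =====
def Claim_equal_part2 : Prop := ∀ (line : String), Dom_part2 line → Spec_part2 line (part2 line)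

-- ===== LEMMAS AND PROOFS =====

-- once res has length 12, A's loop returns res unchanged
theorem doneA (cs : List Char) (n : Int) (rng : List Int) (res : List Char) (pos : Int)
    (h : res.length = 12) : part2Loop cs n rng res pos = res := by
  cases rng with
  | nil => rfl
  | cons c rest => simp [part2Loop, h]

-- forced phase of A: once pos ≤ c, every remaining char is appended until length 12
theorem forcedA (cs : List Char) (d : Nat) : ∀ (c : Nat) (res : List Char) (pos : Int),
    cs.length - c = d → pos ≤ (c : Int) → res.length ≤ 12 →
    part2Loop cs (cs.length : Int) (PySem.List.pyRange (c : Int) (cs.length : Int) 1) res pos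
      = res ++ (cs.drop c).take (12 - res.length) := by
  induction d with
  | zero =>
    intro c res pos hd hpc hr
    have hcn : cs.length ≤ c := by omega
    rw [PySem.List.pyRange_one_eq_nil (by exact_mod_cast hcn)]
    simp [part2Loop, List.drop_eq_nil_of_le hcn]
  | succ d ih =>
    intro c res pos hd hpc hr
    have hcn : c < cs.length := by omega
    rw [PySem.List.pyRange_one_cons (by exact_mod_cast hcn)]
    by_cases h12 : res.length = 12
    · simp [part2Loop, h12]
    · have hget : PySem.List.pyGetD cs (c : Int) ' ' = cs.getD c ' ' := by
        simp [PySem.List.pyGetD_natCast]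
      have hstep : ((c : Int) + 1) = ((c + 1 : Nat) : Int) := by push_cast; ring
      rw [part2Loop]
      simp only [h12, if_false, if_pos hpc, hget, hstep]
      rw [ih (c + 1) (res ++ [cs.getD c ' ']) pos (by omega)
        (by push_cast; omega) (by simp; omega)]
      have hdrop : cs.drop c = cs.getD c ' ' :: cs.drop (c + 1) := by
        rw [List.drop_eq_getElem_cons hcn, List.getD_eq_getElem cs ' ' hcn]
      rw [hdrop]
      have : 12 - res.length = (12 - (res.length + 1)) + 1 := by omega
      rw [this, List.take_succ_cons]
      simp

-- forced phase of B: when start equals the window end, every pick is a singleton window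
theorem forcedB (cs : List Char) (hn : 12 ≤ cs.length) :
    ∀ (k i : Nat) (out : List Char), i + k = 12 →
    altPicks cs cs.length (List.range' i k) (cs.length - 12 + i) out
      = out ++ (cs.drop (cs.length - 12 + i)).take k := by
  intro k
  induction k with
  | zero => intro i out h; simp [altPicks]
  | succ k ih =>
    intro i out h
    have hst : cs.length - 12 + i < cs.length := by omega
    rw [List.range'_succ, altPicks]
    simp only [Nat.sub_self, List.range'_zero, altScan]
    have h1 : cs.length - 12 + i + 1 = cs.length - 12 + (i + 1) := by omega
    rw [h1, ih (i + 1) _ (by omega)]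
    have hdrop : cs.drop (cs.length - 12 + i) = cs.getD (cs.length - 12 + i) ' ' :: cs.drop (cs.length - 12 + (i + 1)) := by
      rw [List.drop_eq_getElem_cons hst, List.getD_eq_getElem cs ' ' hst]
      congr 1
    rw [hdrop, List.take_succ_cons]
    simp

-- leftmost argmax of cs on the index interval [st, e]
def LAmax (cs : List Char) (st e j : Nat) : Prop :=
  st ≤ j ∧ j ≤ e ∧ (∀ t, st ≤ t → t ≤ e → cs.getD t ' ' ≤ cs.getD j ' ') ∧
    (∀ t, st ≤ t → t < j → cs.getD t ' ' < cs.getD j ' ')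

theorem scanB (cs : List Char) (st : Nat) : ∀ (k c j : Nat), LAmax cs st c j →
    LAmax cs st (c + k) (altScan cs (List.range' (c + 1) k) j) := by
  intro k
  induction k with
  | zero => intro c j h; simpa [altScan] using h
  | succ k ih =>
    intro c j h
    obtain ⟨h1, h2, h3, h4⟩ := h
    rw [List.range'_succ, altScan]
    have hstep : LAmax cs st (c + 1) (if cs.getD j ' ' < cs.getD (c + 1) ' ' then c + 1 else j) := by
      split_ifs with hlt
      · refine ⟨by omega, le_refl _, ?_, ?_⟩
        · intro t hst hte
          rcases Nat.lt_or_ge t (c + 1) with h' | h'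
          · exact le_of_lt (lt_of_le_of_lt (h3 t hst (by omega)) hlt)
          · have : t = c + 1 := by omega
            simp [this]
        · intro t hst htl
          exact lt_of_le_of_lt (h3 t hst (by omega)) hlt
      · refine ⟨h1, by omega, ?_, h4⟩
        intro t hst hte
        rcases Nat.lt_or_ge t (c + 1) with h' | h'
        · exact h3 t hst (by omega)
        · have : t = c + 1 := by omega
          rw [this]; exact le_of_not_gt hlt
    have := ih (c + 1) _ hstep
    have harith : c + 1 + k = c + (k + 1) := by omega
    rwa [harith] at this

-- membership in the slice cs[c:e] in index form
theorem mem_window (cs : List Char) (c e : Nat) (he : e ≤ cs.length) (x : Char) :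
    x ∈ (cs.drop c).take (e - c) ↔ ∃ t, c ≤ t ∧ t < e ∧ cs.getD t ' ' = x := by
  constructor
  · intro hx
    obtain ⟨k, hk, hget⟩ := List.mem_iff_getElem.mp hx
    have hlen : ((cs.drop c).take (e - c)).length = min (e - c) (cs.length - c) := by simp
    have hk' : k < e - c := by omega
    have hcd : c + k < cs.length := by omega
    have hkd : k < (cs.drop c).length := by simp [List.length_drop]; omega
    refine ⟨c + k, by omega, by omega, ?_⟩
    rw [List.getD_eq_getElem cs ' ' hcd]
    rw [List.getElem_take, List.getElem_drop] at hget
    exact hget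
  · rintro ⟨t, hct, hte, hx⟩
    have htn : t < cs.length := by omega
    rw [← hx, List.getD_eq_getElem cs ' ' htn]
    rw [List.mem_iff_getElem]
    refine ⟨t - c, ?_, ?_⟩
    · simp [List.length_take, List.length_drop]; omega
    · rw [List.getElem_take, List.getElem_drop]
      congr 1; omega

-- A's elif condition holds at c iff cs[c] dominates the whole window [c, e]
theorem condIff (cs : List Char) (c e : Nat) (hce : c < e) (hen : e < cs.length) :
    (PySem.List.pyGetD cs (c : Int) ' ' =
        (PySem.List.max? (PySem.List.slice cs (some (c : Int)) (some (e : Int))) (fun y => y)).getD ' ' ∧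
      PySem.List.pyGetD cs (e : Int) ' ' ≤
        (PySem.List.max? (PySem.List.slice cs (some (c : Int)) (some (e : Int))) (fun y => y)).getD ' ')
    ↔ (∀ t, c ≤ t → t ≤ e → cs.getD t ' ' ≤ cs.getD c ' ') := by
  rw [PySem.List.slice_natCast]
  set l := (cs.drop c).take (e - c) with hl
  have hmemc : cs.getD c ' ' ∈ l := by
    rw [hl, mem_window cs c e (by omega)]
    exact ⟨c, le_refl _, hce, rfl⟩
  have hne : l ≠ [] := by intro h; rw [h] at hmemc; exact (List.not_mem_nil) hmemc
  obtain ⟨m, hm⟩ : ∃ m, PySem.List.max? l (fun y => y) = some m := by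
    cases hmx : PySem.List.max? l (fun y => y) with
    | none => exact absurd ((PySem.List.max?_eq_none_iff _ _).mp hmx) hne
    | some m => exact ⟨m, rfl⟩
  have hmmem : m ∈ l := PySem.List.max?_mem hm
  have hmmax : ∀ y ∈ l, y ≤ m := fun y hy => PySem.List.max?_isMax hm y hy
  have hgc : PySem.List.pyGetD cs (c : Int) ' ' = cs.getD c ' ' := by simp
  have hge : PySem.List.pyGetD cs (e : Int) ' ' = cs.getD e ' ' := by simp
  rw [hm, hgc, hge]
  simp only [Option.getD_some]
  constructor
  · rintro ⟨hcm, hem⟩ t hct hte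
    rcases Nat.lt_or_ge t e with h' | h'
    · have : cs.getD t ' ' ∈ l := by
        rw [hl, mem_window cs c e (by omega)]; exact ⟨t, hct, h', rfl⟩
      rw [hcm]; exact hmmax _ this
    · have : t = e := by omega
      rw [this, hcm]; exact hem
  · intro hall
    have hmc : m ≤ cs.getD c ' ' := by
      obtain ⟨t, hct, hte, hx⟩ := (mem_window cs c e (by omega) m).mp hmmem
      rw [← hx]; exact hall t hct (by omega)
    have hcm : cs.getD c ' ' = m := le_antisymm (hmmax _ hmemc) hmc
    exact ⟨hcm, by rw [← hcm]; exact hall e (by omega) (le_refl _)⟩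

-- A skips every index strictly left of the leftmost argmax j
theorem skipA (cs : List Char) (i : Nat) (hi : i ≤ 11) (res : List Char) (hr : res.length = i)
    (e : Nat) (he : e = cs.length - 12 + i) (hn : 12 < cs.length) (j : Nat) (hje : j ≤ e)
    (st : Nat) (hstrict : ∀ t, st ≤ t → t < j → cs.getD t ' ' < cs.getD j ' ') :
    ∀ (d c : Nat), j - c = d → st ≤ c → c ≤ j →
    part2Loop cs (cs.length : Int) (PySem.List.pyRange (c : Int) (cs.length : Int) 1) res (e : Int)
      = part2Loop cs (cs.length : Int) (PySem.List.pyRange (j : Int) (cs.length : Int) 1) res (e : Int) := by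
  intro d
  induction d with
  | zero =>
    intro c hd hstc hc
    have : c = j := by omega
    rw [this]
  | succ d ih =>
    intro c hd hstc hc
    have hcj : c < j := by omega
    have hce : c < e := by omega
    have hen : e < cs.length := by omega
    have hcn : c < cs.length := by omega
    rw [PySem.List.pyRange_one_cons (by exact_mod_cast hcn)]
    rw [part2Loop]
    have h12 : ¬ res.length = 12 := by omega
    have hpc : ¬ ((e : Int) ≤ (c : Int)) := by exact_mod_cast Nat.not_le.mpr hce
    simp only [h12, if_false, if_neg hpc]
    have hcond : ¬ (PySem.List.pyGetD cs (c : Int) ' ' =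
        (PySem.List.max? (PySem.List.slice cs (some (c : Int)) (some (e : Int))) (fun y => y)).getD ' ' ∧
      PySem.List.pyGetD cs (e : Int) ' ' ≤
        (PySem.List.max? (PySem.List.slice cs (some (c : Int)) (some (e : Int))) (fun y => y)).getD ' ') := by
      rw [condIff cs c e hce hen]
      intro hall
      exact absurd (hall j (by omega) hje) (not_le.mpr (hstrict c hstc hcj))
    rw [if_neg hcond]
    have hstep : ((c : Int) + 1) = ((c + 1 : Nat) : Int) := by push_cast; ring
    rw [hstep, ih (c + 1) (by omega) (by omega) (by omega)]

-- the main correspondence: A's loop from the start of pick i equals B's remaining picks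
theorem mainLemma (cs : List Char) (hn : 12 < cs.length) :
    ∀ (d i st : Nat) (res : List Char), i + d = 12 → res.length = i → st ≤ cs.length - 12 + i →
    part2Loop cs (cs.length : Int) (PySem.List.pyRange (st : Int) (cs.length : Int) 1) res
        (((cs.length - 12 + i : Nat) : Int))
      = altPicks cs cs.length (List.range' i d) st res := by
  intro d
  induction d with
  | zero =>
    intro i st res hid hr hst
    rw [doneA cs _ _ res _ (by omega)]
    simp [altPicks]
  | succ d ih =>
    intro i st res hid hr hst
    have hi : i ≤ 11 := by omega
    set e : Nat := cs.length - 12 + i with he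
    have hen : e < cs.length := by omega
    set j : Nat := altScan cs (List.range' (st + 1) (e - st)) st with hj
    have hLA : LAmax cs st e j := by
      have h0 : LAmax cs st st st :=
        ⟨le_refl _, le_refl _,
         fun t h1 h2 => le_of_eq (by rw [Nat.le_antisymm h2 h1]),
         fun t h1 h2 => by omega⟩
      have := scanB cs st (e - st) st st h0
      rwa [Nat.add_sub_cancel' hst] at this
    obtain ⟨hLA1, hLA2, hLA3, hLA4⟩ := hLA
    -- B side: unfold one pick
    rw [List.range'_succ, altPicks]
    simp only [← he, ← hj]
    -- A side: skip to j
    rw [skipA cs i hi res hr e he hn j hLA2 st hLA4 (j - st) st rfl (le_refl st) hLA1]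
    have hjn : j < cs.length := by omega
    rw [PySem.List.pyRange_one_cons (by exact_mod_cast hjn)]
    rw [part2Loop]
    have h12 : ¬ res.length = 12 := by omega
    simp only [h12, if_false]
    have hget : PySem.List.pyGetD cs (j : Int) ' ' = cs.getD j ' ' := by simp
    have hstep : ((j : Int) + 1) = ((j + 1 : Nat) : Int) := by push_cast; ring
    rcases Nat.lt_or_ge j e with hje | hje
    · -- regular pick inside the window
      have hpc : ¬ ((e : Int) ≤ (j : Int)) := by exact_mod_cast Nat.not_le.mpr hje
      rw [if_neg hpc]
      have hcond : (PySem.List.pyGetD cs (j : Int) ' ' =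
          (PySem.List.max? (PySem.List.slice cs (some (j : Int)) (some (e : Int))) (fun y => y)).getD ' ' ∧
        PySem.List.pyGetD cs (e : Int) ' ' ≤
          (PySem.List.max? (PySem.List.slice cs (some (j : Int)) (some (e : Int))) (fun y => y)).getD ' ') :=
        (condIff cs j e hje hen).mpr (fun t hjt hte => hLA3 t (by omega) hte)
      rw [if_pos hcond, hget, hstep]
      by_cases h11 : i < 11
      · have hposlt : ((e : Nat) : Int) < (cs.length : Int) - 1 := by omega
        rw [if_pos hposlt]
        have : ((e : Nat) : Int) + 1 = ((cs.length - 12 + (i + 1) : Nat) : Int) := by push_cast; omega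
        rw [this, ih (i + 1) (j + 1) _ (by omega) (by simp [hr]) (by omega)]
      · -- i = 11: twelfth char appended, both sides finish
        have hi11 : i = 11 := by omega
        have hd0 : d = 0 := by omega
        rw [doneA cs _ _ _ _ (by simp [hr]; omega)]
        simp [hd0, altPicks]
    · -- j = e: A enters its forced phase, B's remaining windows are singletons
      have hje' : j = e := by omega
      have hpc : ((e : Int) ≤ (j : Int)) := by exact_mod_cast Nat.le_of_eq hje'.symm
      rw [if_pos hpc, hget, hstep]
      rw [forcedA cs (cs.length - (j + 1)) (j + 1) _ _ rfl (by omega) (by simp; omega)]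
      have hstB : j + 1 = cs.length - 12 + (i + 1) := by omega
      rw [hstB, forcedB cs (by omega) d (i + 1) _ (by omega)]
      simp [hr]
      omega

-- ===== VERDICT (by name: the statement is the Claim_ definition above) =====
theorem part2_spec : Claim_equal_part2 := by
  intro line _
  unfold Spec_part2
  show part2 line = part2_alt line
  simp only [part2, part2_alt]
  set cs := line.toList with hcs
  by_cases hle : cs.length ≤ 12
  · rw [if_pos hle]
    have h0 : ((0 : Nat) : Int) = (0 : Int) := by norm_num
    rw [← h0, forcedA cs cs.length 0 [] _ (by omega) (by push_cast; omega) (by simp)]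
    simp only [List.nil_append, List.length_nil, Nat.sub_zero, List.drop_zero]
    rw [List.take_of_length_le hle, hcs]
    simp
  · rw [if_neg hle]
    have h0 : ((0 : Nat) : Int) = (0 : Int) := by norm_num
    have hpos : ((cs.length : Int) - 12) = ((cs.length - 12 + 0 : Nat) : Int) := by push_cast; omega
    rw [← h0, hpos, mainLemma cs (by omega) 12 0 0 [] (by omega) rfl (by omega)]
    rw [List.range_eq_range']
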